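-- pv_equiv track=rewrite | github.com/RST-Bruit-Cerema/Mizogeo | outilsFonctions.py | OutilVerficationDoublon
-- ===== SOURCE A (Python) =====
-- def OutilVerficationDoublon(listeNomFichierCorrespondance):
--     """
--     en entrée
--         listeNomFichierCorrespondance ---> type list de str
--     en sortie
--         listeDoublon ---> type list
--     """
--     listeDoublon=[]
--     nb=len(listeNomFichierCorrespondance)
--     for m in range(nb):
--         for n in range(m+1,nb):
--             if listeNomFichierCorrespondance[m]==listeNomFichierCorrespondance[n]:
--                 listeDoublon.append(listeNomFichierCorrespondance[m])
--     return listeDoublon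
-- ===== SOURCE B (Python) =====
-- def OutilVerficationDoublon(listeNomFichierCorrespondance):
--     # One pass: precount occurrences, then emit each name once per later occurrence.
--     counts = {}
--     for x in listeNomFichierCorrespondance:
--         counts[x] = counts.get(x, 0) + 1
--     listeDoublon = []
--     for x in listeNomFichierCorrespondance:
--         counts[x] -= 1
--         listeDoublon += [x] * counts[x]
--     return listeDoublon
-- ===== Notes on version B (the rewrite author's own statement) =====
-- stated objective: faster
-- what changed: Replaced the all-pairs double loop with a single counting pass: a dict of occurrence counts is built once, then each element is emitted (remaining-count) times in one pass.
import Mathlib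
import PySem

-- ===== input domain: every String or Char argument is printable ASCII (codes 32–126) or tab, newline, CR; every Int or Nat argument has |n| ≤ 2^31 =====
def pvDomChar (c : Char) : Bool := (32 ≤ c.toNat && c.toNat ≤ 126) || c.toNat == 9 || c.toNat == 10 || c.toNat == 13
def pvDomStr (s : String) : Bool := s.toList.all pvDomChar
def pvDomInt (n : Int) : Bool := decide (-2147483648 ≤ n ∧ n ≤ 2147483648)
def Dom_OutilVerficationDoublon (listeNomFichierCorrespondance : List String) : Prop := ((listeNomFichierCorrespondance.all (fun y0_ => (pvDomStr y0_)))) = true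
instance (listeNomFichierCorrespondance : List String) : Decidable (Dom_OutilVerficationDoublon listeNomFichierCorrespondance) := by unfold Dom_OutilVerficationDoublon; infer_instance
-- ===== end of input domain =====

-- B replaces A's all-pairs double loop by one counting pass over a dict (asymptotically faster).

-- ===== PORT A =====
-- literal port of A: for m in range(nb): for n in range(m+1, nb): if xs[m]==xs[n]: append xs[m]
def OutilVerficationDoublon (listeNomFichierCorrespondance : List String) : List String :=
  let nb : Int := PySem.List.len listeNomFichierCorrespondance
  (PySem.List.pyRange 0 nb 1).foldl
    (fun listeDoublon m =>
      (PySem.List.pyRange (m + 1) nb 1).foldl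
        (fun acc n =>
          if PySem.List.pyGetD listeNomFichierCorrespondance m ""
              = PySem.List.pyGetD listeNomFichierCorrespondance n "" then
            acc ++ [PySem.List.pyGetD listeNomFichierCorrespondance m ""]
          else acc)
        listeDoublon)
    []

-- ===== PORT B =====
-- literal port of B: build counts dict, then one pass emitting each element (remaining count) times
def OutilVerficationDoublon_alt (listeNomFichierCorrespondance : List String) : List String :=
  let counts : PySem.Dict String Int :=
    listeNomFichierCorrespondance.foldl (fun d x => d.insert x (d.getD x 0 + 1)) PySem.Dict.empty
  (listeNomFichierCorrespondance.foldl
    (fun (st : PySem.Dict String Int × List String) x =>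
      let c := st.1.getD x 0 - 1
      (st.1.insert x c, st.2 ++ List.replicate c.toNat x))
    (counts, [])).2

-- ===== PRECONDITION & SPEC =====
def Spec_OutilVerficationDoublon (listeNomFichierCorrespondance : List String) (out : List String) : Prop := out = OutilVerficationDoublon_alt listeNomFichierCorrespondance
instance (listeNomFichierCorrespondance : List String) (out : List String) : Decidable (Spec_OutilVerficationDoublon listeNomFichierCorrespondance out) := by unfold Spec_OutilVerficationDoublon; infer_instance

-- ===== CLAIM (what is proved, stated in full; the proofs are below) =====
def Claim_equal_OutilVerficationDoublon : Prop := ∀ (listeNomFichierCorrespondance : List String), Dom_OutilVerficationDoublon listeNomFichierCorrespondance → Spec_OutilVerficationDoublon listeNomFichierCorrespondance (OutilVerficationDoublon listeNomFichierCorrespondance)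

-- ===== LEMMAS AND PROOFS =====

-- common characterisation: for each element, the duplicates found against the rest of the list
def pvSpecDoublon : List String → List String
  | [] => []
  | x :: rest => List.replicate (rest.count x) x ++ pvSpecDoublon rest

-- a fold appending [a] on each match is a replicate of the match count
theorem pv_cons_rep (a : String) (n : Nat) :
    a :: List.replicate n a = List.replicate n a ++ [a] := by
  rw [← List.replicate_succ, List.replicate_succ']

theorem pv_foldl_match (a : String) : ∀ (ys : List String) (acc : List String),
    ys.foldl (fun acc y => if a = y then acc ++ [a] else acc) acc
      = acc ++ List.replicate (ys.count a) a := by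
  intro ys
  induction ys with
  | nil => intro acc; simp
  | cons y ys ih =>
    intro acc
    by_cases h : a = y
    · subst h
      simp [List.foldl_cons, ih, List.count_cons_self, List.replicate_succ', ← pv_cons_rep,
        List.append_assoc]
    · simp [List.foldl_cons, ih, h, Ne.symm h]

theorem pv_count_cons_ne {x k : String} (h : k ≠ x) (s : List String) :
    (x :: s).count k = s.count k := by
  simp [List.count_cons, Ne.symm h]

-- A equals the flatMap over indices
theorem pv_A_flat (xs : List String) :
    OutilVerficationDoublon xs
      = (List.range xs.length).flatMap
          (fun m => List.replicate ((xs.drop (m+1)).count (xs.getD m "")) (xs.getD m "")) := by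
  unfold OutilVerficationDoublon
  rw [PySem.List.foldl_congr_mem
        (g := fun acc m => acc ++
          List.replicate ((xs.drop (m+1).toNat).count (PySem.List.pyGetD xs m ""))
            (PySem.List.pyGetD xs m ""))]
  · rw [PySem.List.foldl_append_eq_flatMap]
    simp only [PySem.List.len_eq]
    rw [PySem.List.pyRange_zero_nat xs.length, List.flatMap_map]
    simp only [List.nil_append]
    congr 1
    funext k
    simp
  · intro acc m hm
    have h1 : (0:Int) ≤ m + 1 := by
      have := (PySem.List.mem_pyRange_one.mp hm).1
      omega
    rw [PySem.List.foldl_pyRange_pyGetD xs ""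
      (fun acc y => if PySem.List.pyGetD xs m "" = y then acc ++ [PySem.List.pyGetD xs m ""] else acc)
      acc h1]
    exact pv_foldl_match _ _ _

-- flatMap over indices equals the structural spec
theorem pv_flat_spec : ∀ xs : List String,
    (List.range xs.length).flatMap
        (fun m => List.replicate ((xs.drop (m+1)).count (xs.getD m "")) (xs.getD m ""))
      = pvSpecDoublon xs := by
  intro xs
  induction xs with
  | nil => simp [pvSpecDoublon]
  | cons x rest ih =>
    simp only [List.length_cons, List.range_succ_eq_map, List.flatMap_cons, List.flatMap_map,
      Nat.succ_eq_add_one, List.drop_succ_cons, List.getD_cons_succ, List.getD_cons_zero]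
    rw [ih]
    rfl

-- B's emitting loop, under the counting invariant
theorem pv_B_loop : ∀ (rem : List String) (d : PySem.Dict String Int) (acc : List String),
    (∀ k, d.getD k 0 = (rem.count k : Int)) →
    (rem.foldl
      (fun (st : PySem.Dict String Int × List String) x =>
        let c := st.1.getD x 0 - 1
        (st.1.insert x c, st.2 ++ List.replicate c.toNat x))
      (d, acc)).2 = acc ++ pvSpecDoublon rem := by
  intro rem
  induction rem with
  | nil => intro d acc _; simp [pvSpecDoublon]
  | cons x s ih =>
    intro d acc hinv
    have hx : d.getD x 0 = (s.count x : Int) + 1 := by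
      rw [hinv x]; simp
    have hc : d.getD x 0 - 1 = (s.count x : Int) := by omega
    simp only [List.foldl_cons]
    rw [ih (d.insert x (d.getD x 0 - 1)) (acc ++ List.replicate (d.getD x 0 - 1).toNat x)]
    · rw [pvSpecDoublon]
      simp [hc, List.append_assoc]
    · intro k
      rw [PySem.Dict.getD_insert]
      by_cases hk : k = x
      · subst hk; simp [hc]
      · simp [hk, hinv k, pv_count_cons_ne hk]

theorem pv_B_spec (xs : List String) : OutilVerficationDoublon_alt xs = pvSpecDoublon xs := by
  unfold OutilVerficationDoublon_alt
  rw [pv_B_loop xs _ []]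
  · simp
  · intro k
    rw [PySem.Dict.getD_foldl_insert_add_one]
    simp

-- ===== VERDICT (by name: the statement is the Claim_ definition above) =====
theorem OutilVerficationDoublon_spec : Claim_equal_OutilVerficationDoublon := by
  intro xs _
  unfold Spec_OutilVerficationDoublon
  rw [pv_A_flat, pv_flat_spec, pv_B_spec]
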